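-- pv_equiv track=rewrite | github.com/adityajain1095/interview-practice | ctci/recursion.py | eight_two
-- ===== SOURCE A (Python) =====
-- from pprint import pprint
--
-- def eight_two(n):
-- 	if n < 1:
-- 		return 'invalid input, n >= 1'
-- 	matrix = [[0]*n for i in range(n)]
-- 	pprint(matrix)
-- 	#start is 0,0
-- 	for k in range(1,n):
-- 		matrix[0][k] = 1
-- 		matrix[k][0] = 1
-- 	pprint(matrix)
-- 	for i in range(1,n):
-- 		for j in range(1,n):
-- 			matrix[i][j] = matrix[i-1][j]+matrix[i][j-1]
--
-- 	pprint(matrix)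
-- 	paths = 0
-- 	for i in range(n):
-- 		for j in range(n):
-- 			paths += matrix[i][j]
--
-- 	return paths
-- ===== SOURCE B (Python) =====
-- def eight_two(n):
--     if n < 1:
--         return 'invalid input, n >= 1'
--     row = [0] + [1] * (n - 1)
--     total = sum(row)
--     for _ in range(1, n):
--         new = [1]
--         last = 1
--         for v in row[1:]:
--             last = last + v
--             new.append(last)
--         row = new
--         total += sum(row)
--     return total
-- ===== Notes on version B (the rewrite author's own statement) =====
-- stated objective: alternative
-- what changed: Replaces the n-by-n matrix DP (build full grid, edge pass, in-place Pascal fill, then a separate full-grid summation pass) with a rolling one-row DP: keep only the previous row, produce each next row as a running prefix-sum scan, and accumulate the total as rows are produced; no matrix and no pprint debugging output.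
-- outside the precondition, e.g. on eight_two(0): A returns 'invalid input, n >= 1', B returns 'invalid input, n >= 1'
import Mathlib
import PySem

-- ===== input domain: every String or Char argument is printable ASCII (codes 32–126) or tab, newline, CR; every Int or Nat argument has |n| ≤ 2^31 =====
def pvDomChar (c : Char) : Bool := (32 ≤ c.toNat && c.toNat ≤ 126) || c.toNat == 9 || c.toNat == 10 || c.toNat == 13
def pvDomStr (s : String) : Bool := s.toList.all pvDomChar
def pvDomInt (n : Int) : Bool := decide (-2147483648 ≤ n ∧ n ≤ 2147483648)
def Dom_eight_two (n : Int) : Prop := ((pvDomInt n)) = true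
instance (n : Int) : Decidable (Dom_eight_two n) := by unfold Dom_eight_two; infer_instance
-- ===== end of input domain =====

-- B replaces A's full n×n matrix DP by a rolling one-row prefix-sum DP (O(n) space) and
-- drops A's pprint debugging output; return-value equivalence only (A prints, B does not).

-- ===== PORT A =====
-- matrix[i][j] = v  (indices here are the in-range non-negative Nat indices Python uses)
def pvSet2 (m : List (List Int)) (i j : ℕ) (v : Int) : List (List Int) :=
  m.set i ((m.getD i []).set j v)
-- matrix[i][j]  (read; every read A performs is in range, so getD is exact)
def pvGet2 (m : List (List Int)) (i j : ℕ) : Int :=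
  (m.getD i []).getD j 0

-- literal port of A; `range(1,n)` = List.range' 1 (n.toNat-1) for n ≥ 1 (exact on Pre_);
-- the three pprint calls have no return-value effect and are not ported.
def eight_two (n : Int) : Int :=
  if n < 1 then 0  -- Python returns the string 'invalid input, n >= 1' here: outside Pre_
  else
    let N := n.toNat
    let m0 : List (List Int) := (List.range N).map (fun _ => List.replicate N (0 : Int))
    let m1 := (List.range' 1 (N - 1)).foldl (fun m k => pvSet2 (pvSet2 m 0 k 1) k 0 1) m0
    let m2 := (List.range' 1 (N - 1)).foldl (fun m i =>
                (List.range' 1 (N - 1)).foldl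
                  (fun m j => pvSet2 m i j (pvGet2 m (i-1) j + pvGet2 m i (j-1))) m) m1
    (List.range N).foldl (fun s i => (List.range N).foldl (fun s j => s + pvGet2 m2 i j) s) 0

-- ===== PORT B =====
-- literal port of Source B: rolling row; the inner append loop carries (new, last)
def eight_two_alt (n : Int) : Int :=
  if n < 1 then 0  -- Python returns the string 'invalid input, n >= 1' here: outside Pre_
  else
    let N := n.toNat
    let row0 : List Int := 0 :: List.replicate (N - 1) (1 : Int)
    let res := (List.range' 1 (N - 1)).foldl
      (fun (st : List Int × Int) _ =>
        let p := (st.1.drop 1).foldl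
          (fun (q : List Int × Int) v => (q.1 ++ [q.2 + v], q.2 + v)) ([1], 1)
        (p.1, st.2 + p.1.sum))
      (row0, row0.sum)
    res.2

-- ===== PRECONDITION & SPEC =====
-- Pre_ excludes n < 1, where A returns the string 'invalid input, n >= 1', not an int.
def Pre_eight_two (n : Int) : Prop := 1 ≤ n
instance (n : Int) : Decidable (Pre_eight_two n) := by unfold Pre_eight_two; infer_instance
def pvWitness_eight_two : Int := 3

def Spec_eight_two (n : Int) (out : Int) : Prop := out = eight_two_alt n
instance (n : Int) (out : Int) : Decidable (Spec_eight_two n out) := by unfold Spec_eight_two; infer_instance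

-- ===== CLAIM (what is proved, stated in full; the proofs are below) =====
def Claim_equal_eight_two : Prop := ∀ (n : Int), Dom_eight_two n → Pre_eight_two n → Spec_eight_two n (eight_two n)

-- ===== LEMMAS AND PROOFS =====

-- the B-side row recurrence: gRow last vs lists the running sums last+v1, last+v1+v2, …
def gRow : Int → List Int → List Int
  | _, [] => []
  | last, v :: vs => (last + v) :: gRow (last + v) vs

def rowStep (prev : List Int) : List Int := 1 :: gRow 1 (prev.drop 1)

-- row i of the final matrix
def rowFun (r : ℕ) : ℕ → List Int
  | 0 => 0 :: List.replicate r (1 : Int)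
  | i + 1 => rowStep (rowFun r i)

theorem gRow_length (last : Int) (vs : List Int) : (gRow last vs).length = vs.length := by
  induction vs generalizing last with
  | nil => rfl
  | cons v vs ih => simp [gRow, ih]

theorem rowFun_length (r i : ℕ) : (rowFun r i).length = r + 1 := by
  induction i with
  | zero => simp [rowFun]
  | succ i ih =>
    simp [rowFun, rowStep, gRow_length]
    omega

-- closed formula for gRow in terms of prefix sums
theorem gRow_eq_map (last : Int) (vs : List Int) :
    gRow last vs = (List.range vs.length).map (fun k => last + ((vs.take (k+1)).sum)) := by
  induction vs generalizing last with
  | nil => rfl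
  | cons v vs ih =>
    simp only [gRow, ih, List.length_cons, List.range_succ_eq_map, List.map_cons, List.map_map]
    congr 1
    · simp
    · apply List.map_congr_left
      intro k _
      simp only [Function.comp_apply, List.take_succ_cons, List.sum_cons]
      ring
  
theorem rowStep_eq_map (prev : List Int) (r : ℕ) (h : prev.length = r + 1) :
    rowStep prev = (List.range (r+1)).map (fun k => 1 + (((prev.drop 1).take k).sum)) := by
  have hlen : (prev.drop 1).length = r := by simp [h]
  rw [rowStep, gRow_eq_map, hlen, List.range_succ_eq_map]
  simp [List.map_map]

-- B's inner fold builds the row via gRow (second component is the running last)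
theorem bInner_eq (vs : List Int) (acc : List Int) (last : Int) :
    (vs.foldl (fun (q : List Int × Int) v => (q.1 ++ [q.2 + v], q.2 + v)) (acc, last))
      = (acc ++ gRow last vs, last + vs.sum) := by
  induction vs generalizing acc last with
  | nil => simp [gRow]
  | cons v vs ih =>
    simp only [List.foldl_cons, gRow, ih, List.sum_cons, Prod.mk.injEq]
    constructor
    · simp
    · ring

-- getD/set helper lemmas
theorem getD_set_self {α : Type} (l : List α) (i : ℕ) (v d : α) (h : i < l.length) :
    (l.set i v).getD i d = v := by
  simp [List.getD_eq_getElem?_getD, h]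

theorem getD_set_ne {α : Type} (l : List α) (i j : ℕ) (v d : α) (h : i ≠ j) :
    (l.set i v).getD j d = l.getD j d := by
  simp [List.getD_eq_getElem?_getD, List.getElem?_set_ne h]

-- A's inner DP loop touches only row i; it equals a fold on that row alone
theorem innerEq (js : List ℕ) (m : List (List Int)) (i : ℕ) (h1 : 1 ≤ i) (h2 : i < m.length) :
    js.foldl (fun m j => pvSet2 m i j (pvGet2 m (i-1) j + pvGet2 m i (j-1))) m
      = m.set i (js.foldl
          (fun cur j => cur.set j ((m.getD (i-1) []).getD j 0 + cur.getD (j-1) 0))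
          (m.getD i [])) := by
  induction js generalizing m with
  | nil =>
    simp only [List.foldl_nil, List.getD_eq_getElem?_getD, List.getElem?_eq_getElem h2,
      Option.getD_some, List.set_getElem_self]
  | cons j js ih =>
    simp only [List.foldl_cons]
    rw [ih]
    · have hne : i ≠ i - 1 := by omega
      rw [pvSet2]
      rw [getD_set_ne _ _ _ _ _ hne, getD_set_self _ _ _ _ h2, List.set_set]
      rfl
    · simp [pvSet2, h2]

-- the fold on the row computes the prefix-sum row (invariant over the column index)
theorem rowFoldEq (prev : List Int) (r : ℕ) (hp : prev.length = r + 1) (t : ℕ) (ht : t ≤ r) :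
    (List.range' 1 t).foldl
        (fun cur j => cur.set j (prev.getD j 0 + cur.getD (j-1) 0))
        ((1 : Int) :: List.replicate r 0)
      = (List.range (t+1)).map (fun k => 1 + (((prev.drop 1).take k).sum))
          ++ List.replicate (r - t) 0 := by
  have hvs : (prev.drop 1).length = r := by simp [hp]
  induction t with
  | zero => simp
  | succ t ih =>
    have ht' : t ≤ r := by omega
    have htr : t < r := by omega
    rw [List.range'_concat, List.foldl_append, ih ht']
    have h1t : 1 + 1 * t = t + 1 := by omega
    rw [h1t]
    set f : ℕ → Int := fun k => 1 + (((prev.drop 1).take k).sum) with hf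
    have hlenL : ((List.range (t+1)).map f).length = t + 1 := by simp
    have hrd : prev.getD (t+1) 0 = (prev.drop 1).getD t 0 := by
      simp [List.getD_eq_getElem?_getD]
    have hcur : ((List.range (t+1)).map f ++ List.replicate (r - t) 0).getD (t+1-1) 0 = f t := by
      simp only [Nat.add_sub_cancel]
      rw [List.getD_append _ _ _ _ (by simp), PySem.List.getD_map_range _ _ _ _ (by omega)]
    have hval : prev.getD (t+1) 0 + f t = f (t+1) := by
      rw [hrd, hf]
      have hlt : t < (prev.drop 1).length := by omega
      have : (prev.drop 1).take (t+1) = (prev.drop 1).take t ++ [(prev.drop 1).getD t 0] := by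
        rw [List.take_succ, List.getElem?_eq_getElem hlt, List.getD_eq_getElem _ _ hlt]
        rfl
      simp only [this, List.sum_append, List.sum_cons, List.sum_nil]
      ring
    simp only [List.foldl_cons, List.foldl_nil, hcur, hval]
    rw [List.set_append]
    have hnot : ¬ (t + 1 < ((List.range (t+1)).map f).length) := by omega
    rw [if_neg hnot, hlenL, Nat.sub_self]
    have hrep : List.replicate (r - t) (0 : Int) = 0 :: List.replicate (r - (t+1)) 0 := by
      have : r - t = (r - (t+1)) + 1 := by omega
      rw [this, List.replicate_succ]
    rw [hrep]
    simp only [List.set_cons_zero]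
    simp [List.range_succ]

-- single-row summation: the inner summation loop adds up the row
theorem sum_foldl_getD (l : List Int) (s : Int) :
    (List.range l.length).foldl (fun s j => s + l.getD j 0) s = s + l.sum := by
  induction l generalizing s with
  | nil => simp
  | cons x xs ih =>
    rw [List.length_cons, List.range_succ_eq_map, List.foldl_cons, List.foldl_map]
    simpa [add_assoc] using ih (s + x)

-- generic accumulation fold
theorem foldl_add_map {α : Type} (xs : List α) (f : α → Int) (s : Int) :
    xs.foldl (fun s i => s + f i) s = s + (xs.map f).sum := by
  induction xs generalizing s with
  | nil => simp
  | cons x xs ih => simp [ih, add_assoc]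

-- the edge loop: row 0 and column 0 become 1 (invariant over k)
theorem edgeInv (r t : ℕ) (ht : t ≤ r) :
    (List.range' 1 t).foldl (fun m k => pvSet2 (pvSet2 m 0 k 1) k 0 1)
        (List.replicate (r+1) (List.replicate (r+1) (0 : Int)))
      = (0 :: (List.replicate t 1 ++ List.replicate (r-t) 0))
          :: (List.replicate t ((1:Int) :: List.replicate r 0)
              ++ List.replicate (r-t) (List.replicate (r+1) (0 : Int))) := by
  induction t with
  | zero =>
    rw [List.range'_zero, List.foldl_nil, Nat.sub_zero]
    rw [List.replicate_succ (n := r) (a := List.replicate (r+1) (0:Int))]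
    rw [List.replicate_succ (n := r) (a := (0:Int))]
    rfl
  | succ t ih =>
    have ht' : t ≤ r := by omega
    have htr : t < r := by omega
    rw [List.range'_concat, List.foldl_append, ih ht']
    have h1t : 1 + 1 * t = t + 1 := by omega
    rw [h1t]
    have hrt : r - t = (r - (t+1)) + 1 := by omega
    simp only [List.foldl_cons, List.foldl_nil]
    have hrow0 : (List.replicate t (1:Int) ++ List.replicate (r-t) 0).set t 1
        = List.replicate (t+1) 1 ++ List.replicate (r-(t+1)) 0 := by
      rw [List.set_append, if_neg (by simp)]
      simp only [List.length_replicate, Nat.sub_self]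
      rw [hrt, List.replicate_succ (n := r-(t+1)) (a := (0:Int)), List.set_cons_zero,
          List.replicate_succ' (n := t) (a := (1:Int))]
      simp
    have hgetrow : ((List.replicate t ((1:Int) :: List.replicate r 0)
            ++ List.replicate (r-t) (List.replicate (r+1) (0:Int)))).getD t []
        = List.replicate (r+1) (0:Int) := by
      rw [List.getD_append_right _ _ _ _ (by simp)]
      simp only [List.length_replicate, Nat.sub_self]
      rw [hrt, List.replicate_succ (n := r-(t+1)) (a := List.replicate (r+1) (0:Int))]
      simp
    have hsetrow : (List.replicate (r+1) (0:Int)).set 0 1 = (1:Int) :: List.replicate r 0 := by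
      rw [List.replicate_succ, List.set_cons_zero]
    have hsettail : (List.replicate t ((1:Int) :: List.replicate r 0)
            ++ List.replicate (r-t) (List.replicate (r+1) (0:Int))).set t
              ((1:Int) :: List.replicate r 0)
        = List.replicate (t+1) ((1:Int) :: List.replicate r 0)
            ++ List.replicate (r-(t+1)) (List.replicate (r+1) (0:Int)) := by
      rw [List.set_append, if_neg (by simp)]
      simp only [List.length_replicate, Nat.sub_self]
      rw [hrt, List.replicate_succ (n := r-(t+1)) (a := List.replicate (r+1) (0:Int)),
          List.set_cons_zero, List.replicate_succ' (n := t) (a := (1:Int) :: List.replicate r 0)]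
      simp
    simp only [pvSet2, List.getD_cons_zero, List.set_cons_zero, List.getD_cons_succ,
      List.set_cons_succ]
    rw [hrow0, hgetrow, hsetrow, hsettail]

-- the DP loop fills successive rows with rowFun (invariant over the row index)
theorem dpInv (r t : ℕ) (ht : t ≤ r) :
    (List.range' 1 t).foldl (fun m i =>
        (List.range' 1 r).foldl
          (fun m j => pvSet2 m i j (pvGet2 m (i-1) j + pvGet2 m i (j-1))) m)
        ((0 :: List.replicate r 1) :: List.replicate r ((1:Int) :: List.replicate r 0))
      = (List.range (t+1)).map (rowFun r)
          ++ List.replicate (r-t) ((1:Int) :: List.replicate r 0) := by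
  induction t with
  | zero => simp [rowFun]
  | succ t ih =>
    have ht' : t ≤ r := by omega
    have htr : t < r := by omega
    rw [List.range'_concat, List.foldl_append, ih ht']
    have h1t : 1 + 1 * t = t + 1 := by omega
    rw [h1t]
    simp only [List.foldl_cons, List.foldl_nil]
    set m : List (List Int) := (List.range (t+1)).map (rowFun r)
        ++ List.replicate (r-t) ((1:Int) :: List.replicate r 0) with hm
    have hmlen : m.length = r + 1 := by simp [hm]; omega
    have hprev : m.getD ((t+1)-1) [] = rowFun r t := by
      simp only [Nat.add_sub_cancel, hm]
      rw [List.getD_append _ _ _ _ (by simp), PySem.List.getD_map_range _ _ _ _ (by omega)]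
    have hcur : m.getD (t+1) [] = (1:Int) :: List.replicate r 0 := by
      rw [hm, List.getD_append_right _ _ _ _ (by simp)]
      simp only [List.length_map, List.length_range, Nat.sub_self]
      have : r - t = (r - (t+1)) + 1 := by omega
      rw [this, List.replicate_succ]
      simp
    rw [innerEq _ m (t+1) (by omega) (by omega)]
    rw [hprev, hcur]
    rw [rowFoldEq (rowFun r t) r (rowFun_length r t) r le_rfl]
    rw [Nat.sub_self, List.replicate_zero, List.append_nil]
    rw [← rowStep_eq_map (rowFun r t) r (rowFun_length r t)]
    have hrs : rowStep (rowFun r t) = rowFun r (t+1) := rfl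
    rw [hrs, hm, List.set_append, if_neg (by simp)]
    simp only [List.length_map, List.length_range, Nat.sub_self]
    have : r - t = (r - (t+1)) + 1 := by omega
    rw [this, List.replicate_succ, List.set_cons_zero]
    simp [List.range_succ]

-- B's outer fold maintains (current row, running total) (invariant over the row index)
theorem bInv (r t : ℕ) (ht : t ≤ r) :
    (List.range' 1 t).foldl
      (fun (st : List Int × Int) _ =>
        let p := (st.1.drop 1).foldl
          (fun (q : List Int × Int) v => (q.1 ++ [q.2 + v], q.2 + v)) ([1], 1)
        (p.1, st.2 + p.1.sum))
      (0 :: List.replicate r (1:Int), ((0:Int) :: List.replicate r (1:Int)).sum)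
      = (rowFun r t, ((List.range (t+1)).map (fun i => (rowFun r i).sum)).sum) := by
  induction t with
  | zero => simp [rowFun]
  | succ t ih =>
    have ht' : t ≤ r := by omega
    rw [List.range'_concat, List.foldl_append, ih ht']
    simp only [List.foldl_cons, List.foldl_nil]
    rw [bInner_eq]
    have h1 : ([(1:Int)] ++ gRow 1 ((rowFun r t).drop 1), (1:Int) + ((rowFun r t).drop 1).sum).1
        = rowFun r (t+1) := by
      show [(1:Int)] ++ gRow 1 ((rowFun r t).drop 1) = rowStep (rowFun r t)
      simp [rowStep]
    rw [h1]
    simp [List.range_succ, add_assoc]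

-- the combined equivalence on the meaningful domain
theorem eight_two_spec' : ∀ (n : Int), 1 ≤ n → eight_two n = eight_two_alt n := by
  intro n hn
  have hnlt : ¬ n < 1 := by omega
  obtain ⟨r, hN⟩ : ∃ r, n.toNat = r + 1 := ⟨n.toNat - 1, by omega⟩
  rw [eight_two, eight_two_alt, if_neg hnlt, if_neg hnlt]
  simp only [hN, Nat.add_sub_cancel]
  -- A side: matrix initialisation
  have hm0 : (List.range (r+1)).map (fun _ => List.replicate (r+1) (0:Int))
      = List.replicate (r+1) (List.replicate (r+1) (0:Int)) := by
    rw [List.map_const']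
    simp
  rw [hm0]
  -- edge loop
  rw [edgeInv r r le_rfl, Nat.sub_self]
  simp only [List.replicate_zero, List.append_nil]
  -- DP loop (its inner fold ranges over range' 1 r; same literal term)
  rw [dpInv r r le_rfl, Nat.sub_self, List.replicate_zero, List.append_nil]
  -- summation loop = sum of row sums
  have hsum : (List.range (r+1)).foldl
      (fun s i => (List.range (r+1)).foldl
        (fun s j => s + pvGet2 ((List.range (r+1)).map (rowFun r)) i j) s) 0
      = ((List.range (r+1)).map (fun i => (rowFun r i).sum)).sum := by
    rw [PySem.List.foldl_congr_mem _ _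
        (fun s i => s + (rowFun r i).sum) 0 ?_]
    · rw [foldl_add_map]
      simp
    · intro s i hi
      have hi' : i < r + 1 := by simpa [List.mem_range] using hi
      have hrow : ∀ j : ℕ, pvGet2 ((List.range (r+1)).map (rowFun r)) i j
          = (rowFun r i).getD j 0 := by
        intro j
        rw [pvGet2, PySem.List.getD_map_range _ _ _ _ hi']
      simp only [hrow]
      have := sum_foldl_getD (rowFun r i) s
      rw [rowFun_length] at this
      exact this
  rw [hsum]
  -- B side
  rw [bInv r r le_rfl]

-- ===== VERDICT (by name: the statement is the Claim_ definition above) =====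
theorem eight_two_spec : Claim_equal_eight_two := by
  intro n _ hpre
  unfold Spec_eight_two
  exact eight_two_spec' n hpre
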